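-- pv_equiv track=rewrite | github.com/SuperBearcafedo/fintech_master | activation_funcs/common_funcs.py | compare_list_element
-- ===== SOURCE A (Python) =====
-- import copy
--
-- def homo_list_length(list_bench, list_addon):
--     list_bench_temp = copy.deepcopy(list_bench)
--     list_addon_temp = copy.deepcopy(list_addon)
--     list_bench_len = len(list_bench)
--     list_addon_len = len(list_addon)
--     if list_bench_len < list_addon_len:
--         for index in range(list_bench_len, list_addon_len):
--             list_bench_temp.append(0)
--     elif list_addon_len < list_bench_len:
--         for index in range(list_addon_len, list_bench_len):
--             list_addon_temp.append(0)
--     return list_bench_temp, list_addon_temp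
--
-- def compare_list_element(list_a, list_b):
--     result = []
--     list_ta, list_tb = homo_list_length(list_a, list_b)
--     for index in range(0, len(list_ta)):
--         element_a, element_b = list_ta[index], list_tb[index]
--         if element_a < element_b:
--             result.append(0)
--         else:
--             result.append(1)
--     return result
-- ===== SOURCE B (Python) =====
-- def compare_list_element(list_a, list_b):
--     m = min(len(list_a), len(list_b))
--     result = [0 if a < b else 1 for a, b in zip(list_a, list_b)]
--     if len(list_a) > len(list_b):
--         result += [0 if x < 0 else 1 for x in list_a[m:]]
--     else:
--         result += [0 if x > 0 else 1 for x in list_b[m:]]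
--     return result
-- ===== Notes on version B (the rewrite author's own statement) =====
-- stated objective: alternative
-- what changed: B never pads: it compares only the overlapping prefix with zip and then classifies the leftover suffix of the longer list by the sign of its elements (x<0 for a's tail, x>0 for b's tail), concatenating the two segments; A builds two zero-padded deep copies and runs one index loop over them.
import Mathlib
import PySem

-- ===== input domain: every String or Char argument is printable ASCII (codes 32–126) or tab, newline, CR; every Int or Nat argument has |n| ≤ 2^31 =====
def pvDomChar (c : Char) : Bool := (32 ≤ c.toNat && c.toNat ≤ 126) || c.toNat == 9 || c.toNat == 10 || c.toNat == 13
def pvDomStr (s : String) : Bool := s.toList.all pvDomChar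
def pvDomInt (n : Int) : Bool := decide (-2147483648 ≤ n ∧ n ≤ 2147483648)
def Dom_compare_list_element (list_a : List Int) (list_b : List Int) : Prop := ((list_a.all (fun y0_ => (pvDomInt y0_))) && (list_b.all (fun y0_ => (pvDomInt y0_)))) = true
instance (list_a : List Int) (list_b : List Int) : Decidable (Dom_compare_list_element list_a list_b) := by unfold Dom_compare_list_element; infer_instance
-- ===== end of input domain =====

-- B never pads: it compares the overlapping prefix with zip and classifies the leftover
-- suffix of the longer list by element sign, concatenating the two segments (alternative).

-- ===== PORT A =====
-- helper homo_list_length: deep-copies both lists and appends zeros to the shorter one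
-- (the range loops that append 0 are kept as foldl over PySem.List.pyRange)
def homo_list_length (list_bench : List Int) (list_addon : List Int) : List Int × List Int :=
  let list_bench_temp := list_bench
  let list_addon_temp := list_addon
  let list_bench_len : Int := list_bench.length
  let list_addon_len : Int := list_addon.length
  if list_bench_len < list_addon_len then
    ((PySem.List.pyRange list_bench_len list_addon_len 1).foldl
      (fun acc _ => acc ++ [(0 : Int)]) list_bench_temp, list_addon_temp)
  else if list_addon_len < list_bench_len then
    (list_bench_temp,
     (PySem.List.pyRange list_addon_len list_bench_len 1).foldl
      (fun acc _ => acc ++ [(0 : Int)]) list_addon_temp)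
  else
    (list_bench_temp, list_addon_temp)

-- the index loop: list_ta[index] / list_tb[index] are always in range (equal padded
-- lengths), ported with pyGetD 0 which agrees with Python's indexing there
def compare_list_element (list_a : List Int) (list_b : List Int) : List Int :=
  let p := homo_list_length list_a list_b
  let list_ta := p.1
  let list_tb := p.2
  (PySem.List.pyRange 0 list_ta.length 1).foldl
    (fun result index =>
      let element_a := PySem.List.pyGetD list_ta index 0
      let element_b := PySem.List.pyGetD list_tb index 0
      if element_a < element_b then result ++ [0] else result ++ [1]) []

-- ===== PORT B =====
-- overlap compared via zip, then the longer list's suffix (a slice, no padding)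
-- classified by the sign of each element
def compare_list_element_alt (list_a : List Int) (list_b : List Int) : List Int :=
  let m : Int := min (list_a.length : Int) (list_b.length : Int)
  let result := (list_a.zip list_b).map (fun p => if p.1 < p.2 then (0 : Int) else 1)
  if list_b.length < list_a.length then
    result ++ (PySem.List.slice list_a (some m) none).map (fun x => if x < 0 then (0 : Int) else 1)
  else
    result ++ (PySem.List.slice list_b (some m) none).map (fun x => if 0 < x then (0 : Int) else 1)

-- ===== PRECONDITION & SPEC =====
def Spec_compare_list_element (list_a : List Int) (list_b : List Int) (out : List Int) : Prop := out = compare_list_element_alt list_a list_b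
instance (list_a : List Int) (list_b : List Int) (out : List Int) : Decidable (Spec_compare_list_element list_a list_b out) := by unfold Spec_compare_list_element; infer_instance

-- ===== CLAIM =====
def Claim_equal_compare_list_element : Prop := ∀ (list_a : List Int) (list_b : List Int), Dom_compare_list_element list_a list_b → Spec_compare_list_element list_a list_b (compare_list_element list_a list_b)

-- ===== LEMMAS AND PROOFS =====

-- proof-only intermediate: the zero-padded elementwise comparison as one recursion
def zipLongestCmp : List Int → List Int → List Int
  | [], [] => []
  | [], b :: bs => (if (0 : Int) < b then 0 else 1) :: zipLongestCmp [] bs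
  | a :: as_, [] => (if a < (0 : Int) then 0 else 1) :: zipLongestCmp as_ []
  | a :: as_, b :: bs => (if a < b then 0 else 1) :: zipLongestCmp as_ bs

-- appending 0 once per range element pads with zeros
theorem foldl_append_zero (r : List Int) (l : List Int) :
    r.foldl (fun acc _ => acc ++ [(0 : Int)]) l = l ++ List.replicate r.length 0 := by
  induction r generalizing l with
  | nil => simp
  | cons x xs ih => simp [List.foldl_cons, ih, List.replicate_succ]

-- the equal-length index loop computes zipLongestCmp
theorem loop_eq_zip (ta tb : List Int) (h : ta.length = tb.length) :
    (List.range ta.length).map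
      (fun k => if ta.getD k 0 < tb.getD k 0 then (0 : Int) else 1) = zipLongestCmp ta tb := by
  induction ta generalizing tb with
  | nil =>
    cases tb with
    | nil => simp [zipLongestCmp]
    | cons y ys => simp at h
  | cons x xs ih =>
    cases tb with
    | nil => simp at h
    | cons y ys =>
      simp only [List.length_cons, List.range_succ_eq_map, List.map_cons, List.map_map]
      simp only [List.getD_cons_zero, zipLongestCmp]
      exact congrArg _ (ih ys (by simpa using h))

-- padding the left argument with zeros to the right length does not change the result
theorem zip_pad_left : ∀ (b a : List Int), a.length ≤ b.length →
    zipLongestCmp (a ++ List.replicate (b.length - a.length) 0) b = zipLongestCmp a b := by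
  intro b
  induction b with
  | nil =>
    intro a ha
    have : a = [] := List.eq_nil_of_length_eq_zero (Nat.le_zero.mp ha)
    simp [this]
  | cons y ys ih =>
    intro a ha
    cases a with
    | nil =>
      simp only [List.nil_append, List.length_cons, List.length_nil, Nat.sub_zero,
        List.replicate_succ, zipLongestCmp]
      have := ih [] (Nat.zero_le _)
      simp only [List.nil_append, List.length_nil, Nat.sub_zero] at this
      rw [this]
    | cons x xs =>
      simp only [List.length_cons, List.cons_append, zipLongestCmp,
        Nat.succ_sub_succ]
      rw [ih xs (by simpa using ha)]

-- padding the right argument with zeros to the left length does not change the result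
theorem zip_pad_right : ∀ (a b : List Int), b.length ≤ a.length →
    zipLongestCmp a (b ++ List.replicate (a.length - b.length) 0) = zipLongestCmp a b := by
  intro a
  induction a with
  | nil =>
    intro b hb
    have : b = [] := List.eq_nil_of_length_eq_zero (Nat.le_zero.mp hb)
    simp [this]
  | cons x xs ih =>
    intro b hb
    cases b with
    | nil =>
      simp only [List.nil_append, List.length_cons, List.length_nil, Nat.sub_zero,
        List.replicate_succ, zipLongestCmp]
      have := ih [] (Nat.zero_le _)
      simp only [List.nil_append, List.length_nil, Nat.sub_zero] at this
      rw [this]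
    | cons y ys =>
      simp only [List.length_cons, List.cons_append, zipLongestCmp,
        Nat.succ_sub_succ]
      rw [ih ys (by simpa using hb)]

-- A's index loop (over any two equal-length lists) as a range map
theorem loopA_eq (ta tb : List Int) :
    (PySem.List.pyRange 0 ta.length 1).foldl
      (fun result index =>
        let element_a := PySem.List.pyGetD ta index 0
        let element_b := PySem.List.pyGetD tb index 0
        if element_a < element_b then result ++ [0] else result ++ [1]) [] =
    (List.range ta.length).map
      (fun k => if ta.getD k 0 < tb.getD k 0 then (0 : Int) else 1) := by
  have hbody : (fun (result : List Int) (index : Int) =>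
      let element_a := PySem.List.pyGetD ta index 0
      let element_b := PySem.List.pyGetD tb index 0
      if element_a < element_b then result ++ [0] else result ++ [1]) =
      (fun result index =>
        result ++ [if PySem.List.pyGetD ta index 0 < PySem.List.pyGetD tb index 0
                   then (0 : Int) else 1]) := by
    funext r i; by_cases h : PySem.List.pyGetD ta i 0 < PySem.List.pyGetD tb i 0 <;> simp [h]
  rw [hbody, PySem.List.foldl_append_singleton_eq_map, PySem.List.pyRange_zero_nat]
  simp [List.map_map, Function.comp, PySem.List.pyGetD_natCast]

-- zipLongestCmp on a single-sided list is a sign map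
theorem zl_nil_left : ∀ (b : List Int),
    zipLongestCmp [] b = b.map (fun x => if 0 < x then (0 : Int) else 1) := by
  intro b; induction b with
  | nil => simp [zipLongestCmp]
  | cons y ys ih => simp [zipLongestCmp, ih]

theorem zl_nil_right : ∀ (a : List Int),
    zipLongestCmp a [] = a.map (fun x => if x < 0 then (0 : Int) else 1) := by
  intro a; induction a with
  | nil => simp [zipLongestCmp]
  | cons x xs ih => simp [zipLongestCmp, ih]

-- B unfolded: slice becomes drop, the Int min becomes the Nat min
theorem alt_char (a b : List Int) :
    compare_list_element_alt a b =
      (a.zip b).map (fun p => if p.1 < p.2 then (0 : Int) else 1) ++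
      (if b.length < a.length then
        (a.drop (min a.length b.length)).map (fun x => if x < 0 then (0 : Int) else 1)
      else
        (b.drop (min a.length b.length)).map (fun x => if 0 < x then (0 : Int) else 1)) := by
  unfold compare_list_element_alt
  have hmin : min (a.length : Int) (b.length : Int) = ((min a.length b.length : Nat) : Int) := by
    simp [Nat.cast_min]
  simp only [hmin, PySem.List.slice_from_natCast]
  split_ifs <;> rfl

-- zipLongestCmp decomposes into the zip-overlap segment plus the sign-mapped suffix
theorem zl_eq_alt : ∀ (a b : List Int),
    zipLongestCmp a b = compare_list_element_alt a b := by
  intro a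
  induction a with
  | nil =>
    intro b
    rw [alt_char]
    simp [zl_nil_left]
  | cons x xs ih =>
    intro b
    cases b with
    | nil =>
      rw [alt_char]
      simp [zl_nil_right]
    | cons y ys =>
      rw [alt_char]
      have ihc := (ih ys).trans (alt_char xs ys)
      simp only [zipLongestCmp, ihc, List.length_cons, List.zip_cons_cons, List.map_cons,
        Nat.succ_min_succ, List.drop_succ_cons, Nat.add_lt_add_iff_right, List.cons_append]

-- A computes zipLongestCmp
theorem A_eq_zl (list_a list_b : List Int) :
    compare_list_element list_a list_b = zipLongestCmp list_a list_b := by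
  unfold compare_list_element homo_list_length
  simp only []
  rcases Nat.lt_trichotomy list_a.length list_b.length with h | h | h
  · have hi : (list_a.length : Int) < (list_b.length : Int) := by exact_mod_cast h
    simp only [hi, if_pos]
    rw [foldl_append_zero]
    have hlen : (PySem.List.pyRange (list_a.length : Int) (list_b.length : Int) 1).length
        = list_b.length - list_a.length := by
      rw [PySem.List.length_pyRange_one]; omega
    rw [hlen]
    rw [loopA_eq, loop_eq_zip _ _ (by simp; omega)]
    exact zip_pad_left list_b list_a (Nat.le_of_lt h)
  · have hi : ¬ ((list_a.length : Int) < (list_b.length : Int)) := by simp [h]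
    have hi2 : ¬ ((list_b.length : Int) < (list_a.length : Int)) := by simp [h]
    simp only [hi, hi2, if_false]
    rw [loopA_eq, loop_eq_zip _ _ h]
  · have hi : ¬ ((list_a.length : Int) < (list_b.length : Int)) := by
      simp; exact_mod_cast Nat.le_of_lt h
    have hi2 : (list_b.length : Int) < (list_a.length : Int) := by exact_mod_cast h
    simp only [hi, hi2, if_false, if_pos]
    rw [foldl_append_zero]
    have hlen : (PySem.List.pyRange (list_b.length : Int) (list_a.length : Int) 1).length
        = list_a.length - list_b.length := by
      rw [PySem.List.length_pyRange_one]; omega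
    rw [hlen]
    rw [loopA_eq, loop_eq_zip _ _ (by simp; omega)]
    exact zip_pad_right list_a list_b (Nat.le_of_lt h)

-- ===== VERDICT =====
theorem compare_list_element_spec : Claim_equal_compare_list_element := by
  intro list_a list_b _
  show compare_list_element list_a list_b = compare_list_element_alt list_a list_b
  rw [A_eq_zl, zl_eq_alt]
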